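-- pv_equiv track=rewrite | github.com/moliveri1618/dfo_extractor | api/routers/v1/contract.py | calculate_common_fields
-- ===== SOURCE A (Python) =====
-- def calculate_common_fields(products):
--     if not products:
--         return {}
--
--     if len(products) == 1:
--         return dict(products[0])
--
--     common = {}
--     first = products[0]
--
--     for key, value in first.items():
--         if key == "Posizione":
--             continue
--
--         if all(p.get(key) == value for p in products) and value:
--             common[key] = value
--
--     return common
-- ===== SOURCE B (Python) =====
-- def calculate_common_fields(products):
--     if not products:
--         return {}
--
--     if len(products) == 1:
--         return dict(products[0])
--
--     def shrink(cand, rest):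
--         if not rest:
--             return {k: v for k, v in cand.items() if v}
--         head = rest[0]
--         return shrink({k: v for k, v in cand.items() if head.get(k) == v}, rest[1:])
--
--     return shrink({k: v for k, v in products[0].items() if k != "Posizione"},
--                   products[1:])
-- ===== Notes on version B (the rewrite author's own statement) =====
-- stated objective: alternative
-- what changed: Instead of A's key-outer loop that runs an all() scan over every product for each key of the first dict, B recurses over the remaining products with a shrinking candidate dict seeded from the first product, filtering it once per product and dropping falsy values at the base case.
import Mathlib
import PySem

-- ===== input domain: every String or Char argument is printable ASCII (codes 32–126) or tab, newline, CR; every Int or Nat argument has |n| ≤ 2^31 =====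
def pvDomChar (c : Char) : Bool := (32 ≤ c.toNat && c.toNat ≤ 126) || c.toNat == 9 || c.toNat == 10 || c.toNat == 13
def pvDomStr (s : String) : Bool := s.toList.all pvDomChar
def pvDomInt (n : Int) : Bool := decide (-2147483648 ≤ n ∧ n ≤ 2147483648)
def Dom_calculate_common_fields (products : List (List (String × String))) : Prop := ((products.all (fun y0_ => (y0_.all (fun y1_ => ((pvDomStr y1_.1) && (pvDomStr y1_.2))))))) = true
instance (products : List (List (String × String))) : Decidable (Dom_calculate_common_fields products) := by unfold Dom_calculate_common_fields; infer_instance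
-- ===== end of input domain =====

-- B replaces A's key-outer all()-scan by a recursion over the remaining products with a shrinking candidate dict; objective: alternative decomposition (same cost).

-- ===== PORT A =====
def calculate_common_fields (products : List (List (String × String))) : List (String × String) :=
  match products with
  | [] => []
  | [first] => (PySem.Dict.ofList first).items
  | first :: _ :: _ =>
    (first.foldl
      (fun (common : PySem.Dict String String) kv =>
        if kv.1 == "Posizione" then common
        else if (products.all fun p => (PySem.Dict.mk p).get? kv.1 == some kv.2) && kv.2 != "" then
          common.insert kv.1 kv.2
        else common)
      PySem.Dict.empty).items

-- ===== PORT B =====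
-- B's inner recursive helper `shrink(cand, rest)`: filters the candidate by each
-- remaining product in turn, and drops falsy values at the base case.
def shrinkCCF (cand : List (String × String)) :
    List (List (String × String)) → List (String × String)
  | [] => cand.filter (fun kv => kv.2 != "")
  | head :: tail =>
    shrinkCCF (cand.filter (fun kv => (PySem.Dict.mk head).get? kv.1 == some kv.2)) tail

def calculate_common_fields_alt (products : List (List (String × String))) : List (String × String) :=
  match products with
  | [] => []
  | [first] => (PySem.Dict.ofList first).items
  | first :: rest =>
    shrinkCCF (first.filter (fun kv => kv.1 != "Posizione")) rest

-- ===== PRECONDITION & SPEC =====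
-- The dict parameters are encoded as association lists; Pre_ admits exactly the lists with
-- pairwise-distinct keys, i.e. the faithful encodings of Python dicts (a duplicate-key list
-- does not correspond to any input the Python function can receive).
def Pre_calculate_common_fields (products : List (List (String × String))) : Prop :=
  ∀ p ∈ products, (p.map Prod.fst).Nodup
instance (products : List (List (String × String))) : Decidable (Pre_calculate_common_fields products) := by unfold Pre_calculate_common_fields; infer_instance
def pvWitness_calculate_common_fields : (List (List (String × String))) :=
  [[("a", "1"), ("b", "")], [("a", "1")]]
def Spec_calculate_common_fields (products : List (List (String × String))) (out : List (String × String)) : Prop := out = calculate_common_fields_alt products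
instance (products : List (List (String × String))) (out : List (String × String)) : Decidable (Spec_calculate_common_fields products out) := by unfold Spec_calculate_common_fields; infer_instance

-- ===== CLAIM (what is proved, stated in full; the proofs are below) =====
def Claim_equal_calculate_common_fields : Prop := ∀ (products : List (List (String × String))), Dom_calculate_common_fields products → Pre_calculate_common_fields products → Spec_calculate_common_fields products (calculate_common_fields products)

-- ===== LEMMAS AND PROOFS =====

-- B's recursion of filters is one filter by the conjunction over all remaining products,
-- followed by the falsy filter.
theorem shrinkCCF_eq :
    ∀ (ps : List (List (String × String))) (c : List (String × String)),
      shrinkCCF c ps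
        = (c.filter (fun kv =>
            ps.all (fun p => (PySem.Dict.mk p).get? kv.1 == some kv.2))).filter
            (fun kv => kv.2 != "") := by
  intro ps
  induction ps with
  | nil => intro c; simp [shrinkCCF]
  | cons p ps ih =>
    intro c
    simp only [shrinkCCF, ih, List.filter_filter, List.all_cons]
    refine List.filter_congr fun x _ => ?_
    cases hg : ((PySem.Dict.mk p).get? x.1 == some x.2) <;> simp [hg]

-- first-match lookup in a nodup-key list finds the member itself
theorem get_mk_of_mem {kv : String × String} {l : List (String × String)}
    (hnd : (l.map Prod.fst).Nodup) (hmem : kv ∈ l) :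
    (PySem.Dict.mk l).get? kv.1 = some kv.2 :=
  PySem.Dict.get?_of_mem_items (d := PySem.Dict.mk l) (by simpa using hmem) (by simpa using hnd)

theorem calculate_common_fields_spec : Claim_equal_calculate_common_fields := by
  intro products _ hpre
  unfold Spec_calculate_common_fields
  match products with
  | [] => rfl
  | [first] => rfl
  | first :: q :: rest =>
    have hnd : (first.map Prod.fst).Nodup := hpre first (by simp)
    simp only [calculate_common_fields, calculate_common_fields_alt]
    rw [shrinkCCF_eq]
    -- rewrite A's nested branches as one conditional insert
    have hfun :
        (fun (common : PySem.Dict String String) kv =>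
          if kv.1 == "Posizione" then common
          else if ((first :: q :: rest).all fun p => (PySem.Dict.mk p).get? kv.1 == some kv.2) && kv.2 != "" then
            common.insert kv.1 kv.2
          else common)
        = (fun (common : PySem.Dict String String) (kv : String × String) =>
            if (kv.1 != "Posizione") &&
               ((first :: q :: rest).all fun p => (PySem.Dict.mk p).get? kv.1 == some kv.2) && kv.2 != "" then
              common.insert kv.1 kv.2
            else common) := by
      funext common kv
      by_cases h : kv.1 = "Posizione" <;> simp [h]
    rw [hfun, ← List.foldl_filter]
    set cA : String × String → Bool := fun kv =>
      (kv.1 != "Posizione") &&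
        ((first :: q :: rest).all fun p => (PySem.Dict.mk p).get? kv.1 == some kv.2) && kv.2 != "" with hcA
    rw [PySem.Dict.items_foldl_insert_fresh (k := Prod.fst) (v := Prod.snd)
        (d := PySem.Dict.empty) (l := first.filter cA)
        (by intro a _; exact PySem.Dict.contains_empty _)
        (hnd.sublist ((List.filter_sublist (l := first)).map Prod.fst))]
    simp only [PySem.Dict.empty, List.nil_append, List.filter_filter]
    rw [List.map_id']
    refine (List.filter_congr fun kv hmem => ?_).symm
    have hg : ((PySem.Dict.mk first).get? kv.1 == some kv.2) = true := by
      simp [get_mk_of_mem hnd hmem]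
    simp only [hcA, List.all_cons, hg, Bool.true_and]
    cases (kv.1 != "Posizione") <;> cases (kv.2 != "") <;> simp
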